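-- pv_equiv track=rewrite | github.com/LRoInT/pyfastindex | managerlib/algo/info/link.py | sorted_id_2
-- ===== SOURCE A (Python) =====
-- def sorted_id_2(id1, id2) -> list[list]:
--     # 排序2个id
--     # 从长度判断
--     if (id1_l := len(id1)) > (id2_l := len(id2)):
--         return [id2, id1]
--     elif id1_l < id2_l:
--         return [id1, id2]
--     else:
--         e = max(id1_l, id2_l)
--         n = 0
--         while True:
--             if id1[n] > id2[n]:
--                 return [id2, id1]
--             elif id1[n] < id2[n]:
--                 return [id1, id2]
--             n += 1
--             if n == e:
--                 return [id1, id2]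
-- ===== SOURCE B (Python) =====
-- def sorted_id_2(id1, id2) -> list[list]:
--     # One length-first key comparison instead of length branches + index loop.
--     if (len(id1), id1) <= (len(id2), id2):
--         return [id1, id2]
--     return [id2, id1]
-- ===== Notes on version B (the rewrite author's own statement) =====
-- stated objective: simpler
-- what changed: Replaced the explicit length branching plus the manual index-based while-loop scan with a single length-first tuple comparison (len(id), id), so the whole function is one comparison and two returns.
import Mathlib
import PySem

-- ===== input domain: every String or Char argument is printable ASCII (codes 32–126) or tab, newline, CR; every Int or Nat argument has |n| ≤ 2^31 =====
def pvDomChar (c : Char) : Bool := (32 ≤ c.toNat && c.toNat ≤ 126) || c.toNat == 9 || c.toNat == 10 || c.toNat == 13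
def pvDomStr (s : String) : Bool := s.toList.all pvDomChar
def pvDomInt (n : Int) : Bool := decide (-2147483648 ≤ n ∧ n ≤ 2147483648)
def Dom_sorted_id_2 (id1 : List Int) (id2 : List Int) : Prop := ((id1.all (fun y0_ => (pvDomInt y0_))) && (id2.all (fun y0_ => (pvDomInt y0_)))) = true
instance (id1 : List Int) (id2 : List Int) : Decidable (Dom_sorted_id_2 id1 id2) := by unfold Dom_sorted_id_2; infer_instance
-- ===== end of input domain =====

-- B replaces A's length branches + manual index scan by one length-first key comparison (objective: simpler).

-- ===== PORT A =====
-- A's `while True` loop over index n; fuel bounds the recursion (the Python loop raises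
-- IndexError before fuel could run out on any input admitted by Pre_: when e = 0, Python
-- indexes id1[0] and raises, which Pre_ excludes; the fuel-0 value [] is never claimed).
def sorted_id_2_loop (id1 id2 : List Int) (e : Nat) : Nat → Nat → List (List Int)
  | _, 0 => []
  | n, fuel+1 =>
    let a := (PySem.List.pyGet? id1 (n : Int)).getD 0
    let b := (PySem.List.pyGet? id2 (n : Int)).getD 0
    if a > b then [id2, id1]
    else if a < b then [id1, id2]
    else if n + 1 == e then [id1, id2]
    else sorted_id_2_loop id1 id2 e (n+1) fuel

def sorted_id_2 (id1 : List Int) (id2 : List Int) : List (List Int) :=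
  let id1_l := id1.length
  let id2_l := id2.length
  if id1_l > id2_l then [id2, id1]
  else if id1_l < id2_l then [id1, id2]
  else
    let e := max id1_l id2_l
    sorted_id_2_loop id1 id2 e 0 e

-- ===== PORT B =====
-- Python list/tuple lexicographic `<=` on the second key component.
def pyListLe : List Int → List Int → Bool
  | [], _ => true
  | _::_, [] => false
  | a::u, b::v => if a < b then true else if b < a then false else pyListLe u v

-- `(len(id1), id1) <= (len(id2), id2)` : tuple comparison, length first.
def sorted_id_2_alt (id1 : List Int) (id2 : List Int) : List (List Int) :=
  if (if id1.length < id2.length then true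
      else if id2.length < id1.length then false
      else pyListLe id1 id2) then [id1, id2]
  else [id2, id1]

-- ===== PRECONDITION & SPEC =====
-- Pre_ excludes only the input where both lists are empty: there A's loop evaluates id1[0] and raises IndexError.
def Pre_sorted_id_2 (id1 : List Int) (id2 : List Int) : Prop := ¬ (id1 = [] ∧ id2 = [])
instance (id1 : List Int) (id2 : List Int) : Decidable (Pre_sorted_id_2 id1 id2) := by unfold Pre_sorted_id_2; infer_instance
def pvWitness_sorted_id_2 : List Int × List Int := ([1, 2], [3])

def Spec_sorted_id_2 (id1 : List Int) (id2 : List Int) (out : List (List Int)) : Prop := out = sorted_id_2_alt id1 id2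
instance (id1 : List Int) (id2 : List Int) (out : List (List Int)) : Decidable (Spec_sorted_id_2 id1 id2 out) := by unfold Spec_sorted_id_2; infer_instance

-- ===== CLAIM (what is proved, stated in full; the proofs are below) =====
def Claim_equal_sorted_id_2 : Prop := ∀ (id1 : List Int) (id2 : List Int), Dom_sorted_id_2 id1 id2 → Pre_sorted_id_2 id1 id2 → Spec_sorted_id_2 id1 id2 (sorted_id_2 id1 id2)

-- ===== LEMMAS AND PROOFS =====
lemma loop_eq (id1 id2 : List Int) (e : Nat) (h1 : id1.length = e) (h2 : id2.length = e) :
    ∀ fuel n, n < e → e ≤ n + fuel →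
      sorted_id_2_loop id1 id2 e n fuel =
        (if pyListLe (id1.drop n) (id2.drop n) then [id1, id2] else [id2, id1]) := by
  intro fuel
  induction fuel with
  | zero => intro n hn hf; omega
  | succ fuel ih =>
    intro n hn hf
    have hn1 : n < id1.length := by omega
    have hn2 : n < id2.length := by omega
    have g1 : (PySem.List.pyGet? id1 (n : Int)).getD 0 = id1[n] := by
      rw [PySem.List.pyGet?_natCast id1 n, List.getElem?_eq_getElem hn1]; rfl
    have g2 : (PySem.List.pyGet? id2 (n : Int)).getD 0 = id2[n] := by
      rw [PySem.List.pyGet?_natCast id2 n, List.getElem?_eq_getElem hn2]; rfl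
    have d1 : id1.drop n = id1[n] :: id1.drop (n+1) := List.drop_eq_getElem_cons hn1
    have d2 : id2.drop n = id2[n] :: id2.drop (n+1) := List.drop_eq_getElem_cons hn2
    rw [sorted_id_2_loop, d1, d2]
    simp only [g1, g2, pyListLe]
    by_cases hgt : id1[n] > id2[n]
    · have h' : ¬ id1[n] < id2[n] := by omega
      simp [hgt, h']
    · by_cases hlt : id1[n] < id2[n]
      · have h' : ¬ id2[n] < id1[n] := by omega
        simp [hlt, h']
      · have heq' : ¬ id2[n] < id1[n] := by omega
        simp only [if_neg heq', if_neg hlt, gt_iff_lt]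
        by_cases hend : n + 1 = e
        · subst hend
          have e1 : id1.drop (n+1) = [] := List.drop_eq_nil_of_le (by omega)
          have e2 : id2.drop (n+1) = [] := List.drop_eq_nil_of_le (by omega)
          simp [e1, e2, pyListLe]
        · have : (n + 1 == e) = false := by simp [hend]
          rw [this]
          simp only [Bool.false_eq_true, if_false]
          exact ih (n+1) (by omega) (by omega)

theorem sorted_id_2_spec : Claim_equal_sorted_id_2 := by
  intro id1 id2 _ hpre
  unfold Spec_sorted_id_2 sorted_id_2 sorted_id_2_alt
  by_cases hgt : id1.length > id2.length
  · have h' : ¬ id1.length < id2.length := by omega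
    simp [hgt, h']
  · by_cases hlt : id1.length < id2.length
    · simp [hlt, hgt]
    · have hlen : id1.length = id2.length := by omega
      have hne : id1.length ≠ 0 := by
        intro h0
        exact hpre ⟨List.eq_nil_of_length_eq_zero h0,
          List.eq_nil_of_length_eq_zero (by omega)⟩
      simp only [hgt, hlt, if_false]
      have := loop_eq id1 id2 (max id1.length id2.length) (by omega) (by omega)
        (max id1.length id2.length) 0 (by omega) (by omega)
      simp only [List.drop_zero] at this
      simp [this]
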